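-- pv_equiv track=rewrite | github.com/ndbellew/AIHomeworkPython | Homework1/QueenPuzzle.py | moveToString
-- ===== SOURCE A (Python) =====
-- def moveToString(from_row, from_col, to_row, to_col, n):
--     def colLabel(col):
--         result = ""
--         while col >= 0:
--             result = chr((col % 26) + 65) + result
--             col = col // 26 - 1
--         return result
--     def rowLabel(row):
--         return str(row + 1)
--     return f"{colLabel(from_col)}{rowLabel(from_row)} to {colLabel(to_col)}{rowLabel(to_row)}"
-- ===== SOURCE B (Python) =====
-- def moveToString(from_row, from_col, to_row, to_col, n):
--     def colLabel(col):
--         if col < 0: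
--             return ""
--         # Stage 1: locate the block of labels with the same letter-count.
--         start, width = 0, 26
--         while col >= start + width:
--             start += width
--             width *= 26
--         # Stage 2: emit the plain base-26 digits of the offset, most significant first.
--         off = col - start
--         letters = []
--         p = width // 26
--         while p > 0:
--             letters.append(chr(65 + off // p % 26))
--             p //= 26
--         return "".join(letters)
--     def rowLabel(row):
--         return str(row + 1)
--     return f"{colLabel(from_col)}{rowLabel(from_row)} to {colLabel(to_col)}{rowLabel(to_row)}"
-- ===== Notes on version B (the rewrite author's own statement) =====
-- stated objective: alternative
-- what changed: colLabel's single prepend-accumulator loop over the bijective-base-26 recurrence (col -> col//26-1) is replaced by a two-stage algorithm: first locate the same-length block of labels (start/width scan), then emit the plain base-26 digits of the offset most-significant-first.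
import Mathlib
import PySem

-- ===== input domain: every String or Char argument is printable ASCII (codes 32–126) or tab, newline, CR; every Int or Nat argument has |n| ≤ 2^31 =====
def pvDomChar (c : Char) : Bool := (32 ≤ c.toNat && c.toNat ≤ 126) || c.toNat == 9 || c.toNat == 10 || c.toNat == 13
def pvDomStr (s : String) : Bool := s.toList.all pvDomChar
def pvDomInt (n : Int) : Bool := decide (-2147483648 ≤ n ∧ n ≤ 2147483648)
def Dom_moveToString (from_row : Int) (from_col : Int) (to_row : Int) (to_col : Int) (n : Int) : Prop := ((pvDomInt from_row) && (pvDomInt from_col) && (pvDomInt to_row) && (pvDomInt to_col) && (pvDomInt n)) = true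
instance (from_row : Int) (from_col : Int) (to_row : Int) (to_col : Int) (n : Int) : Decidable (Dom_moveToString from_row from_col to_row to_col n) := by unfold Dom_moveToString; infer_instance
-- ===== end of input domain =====

-- B replaces colLabel's single prepend-accumulator loop by a two-stage algorithm
-- (locate the same-length label block, then emit plain base-26 digits MSB-first);
-- objective: alternative decomposition, same cost.

-- ===== PORT A =====
-- A's inner 'while col >= 0' loop, over List Char (string built char-by-char; exact for ASCII)
def colLabelA (col : Int) (result : List Char) : List Char :=
  if h : col ≥ 0 then
    colLabelA (PySem.Int.floordiv col 26 - 1)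
      (Char.ofNat ((PySem.Int.mod col 26).toNat + 65) :: result)
  else result
termination_by (col + 1).toNat
decreasing_by
  rw [PySem.Int.floordiv_eq_ediv_of_pos (by norm_num)]
  have h1 := Int.ediv_le_self 26 h
  have h2 : 0 ≤ col / 26 := Int.ediv_nonneg h (by norm_num)
  omega

def moveToString (from_row : Int) (from_col : Int) (to_row : Int) (to_col : Int) (n : Int) : String :=
  String.ofList (colLabelA from_col [] ++ PySem.Int.toChars (from_row + 1)
    ++ " to ".toList ++ colLabelA to_col [] ++ PySem.Int.toChars (to_row + 1))

-- ===== PORT B =====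
-- B's stage 1: 'while col >= start + width: start += width; width *= 26'
-- (the '0 < width' conjunct is a totality guard only: width is always a positive power of 26)
def findW (col start width : Int) : Int × Int :=
  if h : 0 < width ∧ start + width ≤ col then findW col (start + width) (width * 26)
  else (start, width)
termination_by (col + 1 - start).toNat
decreasing_by omega

-- B's stage 2: 'while p > 0: letters.append(chr(65 + off // p % 26)); p //= 26'
def emitL (off p : Int) : List Char :=
  if h : 0 < p then
    Char.ofNat ((PySem.Int.mod (PySem.Int.floordiv off p) 26).toNat + 65)
      :: emitL off (PySem.Int.floordiv p 26)
  else []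
termination_by p.toNat
decreasing_by
  rw [PySem.Int.floordiv_eq_ediv_of_pos (by norm_num)]
  have h1 : p / 26 < p := Int.ediv_lt_self_of_pos_of_ne_one h (by norm_num)
  have h2 : 0 ≤ p / 26 := Int.ediv_nonneg (le_of_lt h) (by norm_num)
  omega

def colLabelB (col : Int) : List Char :=
  if col < 0 then []
  else
    let sw := findW col 0 26
    emitL (col - sw.1) (PySem.Int.floordiv sw.2 26)

def moveToString_alt (from_row : Int) (from_col : Int) (to_row : Int) (to_col : Int) (n : Int) : String :=
  String.ofList (colLabelB from_col ++ PySem.Int.toChars (from_row + 1)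
    ++ " to ".toList ++ colLabelB to_col ++ PySem.Int.toChars (to_row + 1))

-- ===== PRECONDITION & SPEC =====
def Spec_moveToString (from_row : Int) (from_col : Int) (to_row : Int) (to_col : Int) (n : Int) (out : String) : Prop := out = moveToString_alt from_row from_col to_row to_col n
instance (from_row : Int) (from_col : Int) (to_row : Int) (to_col : Int) (n : Int) (out : String) : Decidable (Spec_moveToString from_row from_col to_row to_col n out) := by unfold Spec_moveToString; infer_instance

-- ===== CLAIM (what is proved, stated in full; the proofs are below) =====
def Claim_equal_moveToString : Prop := ∀ (from_row : Int) (from_col : Int) (to_row : Int) (to_col : Int) (n : Int), Dom_moveToString from_row from_col to_row to_col n → Spec_moveToString from_row from_col to_row to_col n (moveToString from_row from_col to_row to_col n)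

-- ===== LEMMAS AND PROOFS =====

-- shifting the stage-1 scan: the scan for col, started one block further in,
-- mirrors the scan for col' = col//26 - 1
theorem findW_shift (col s w : Int) (hw : 0 < w) :
    findW col (26 * s + 26) (26 * w) =
      (26 * (findW (PySem.Int.floordiv col 26 - 1) s w).1 + 26,
       26 * (findW (PySem.Int.floordiv col 26 - 1) s w).2) := by
  have hiff : (s + w ≤ PySem.Int.floordiv col 26 - 1) ↔ (26 * s + 26 + 26 * w ≤ col) := by
    rw [show (s + w ≤ PySem.Int.floordiv col 26 - 1) ↔ (s + w + 1 ≤ PySem.Int.floordiv col 26)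
        from by omega, PySem.Int.le_floordiv_iff_mul_le (by norm_num)]
    omega
  by_cases hc : s + w ≤ PySem.Int.floordiv col 26 - 1
  · conv_lhs => rw [findW.eq_def]
    rw [dif_pos ⟨by positivity, hiff.mp hc⟩,
        show 26 * s + 26 + 26 * w = 26 * (s + w) + 26 from by ring,
        show 26 * w * 26 = 26 * (w * 26) from by ring,
        findW_shift col (s + w) (w * 26) (by positivity)]
    conv_rhs => rw [findW.eq_def]
    rw [dif_pos ⟨hw, hc⟩]
  · conv_lhs => rw [findW.eq_def]
    conv_rhs => rw [findW.eq_def]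
    rw [dif_neg (fun h => hc (hiff.mpr h.2)), dif_neg (fun h => hc h.2)]
termination_by (PySem.Int.floordiv col 26 - s).toNat
decreasing_by omega

-- stage-1 widths are powers of 26
theorem findW_pow (col s w : Int) :
    (∃ k : Nat, w = (26:Int) ^ (k + 1)) → ∃ j : Nat, (findW col s w).2 = (26:Int) ^ (j + 1) := by
  rintro ⟨k, hk⟩
  rw [findW.eq_def]
  split_ifs with h
  · exact findW_pow col (s + w) (w * 26) ⟨k + 1, by rw [hk]; ring⟩
  · exact ⟨k, hk⟩
termination_by (col + 1 - s).toNat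
decreasing_by omega

theorem emitL_one (x : Int) : emitL x 1 = [Char.ofNat ((PySem.Int.mod x 26).toNat + 65)] := by
  have h1 : PySem.Int.floordiv x 1 = x := by
    rw [PySem.Int.floordiv_eq_iff_of_pos one_pos]; omega
  have h2 : PySem.Int.floordiv 1 26 = 0 := by decide
  rw [emitL.eq_def, dif_pos one_pos, h1, h2, emitL.eq_def, dif_neg (by norm_num)]

-- shifting the stage-2 digit emitter by one base-26 digit
theorem emit_shift (j : Nat) (o r : Int) (hr0 : 0 ≤ r) (hr : r < 26) :
    emitL (26 * o + r) ((26:Int) ^ (j + 1)) =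
      emitL o ((26:Int) ^ j) ++ [Char.ofNat (r.toNat + 65)] := by
  induction j with
  | zero =>
    norm_num
    have hX : PySem.Int.floordiv (26 * o + r) 26 = o := by
      rw [PySem.Int.floordiv_eq_iff_of_pos (by norm_num)]; omega
    have h26 : PySem.Int.floordiv 26 26 = 1 := by decide
    have hmod : PySem.Int.mod (26 * o + r) 26 = r := by
      rw [PySem.Int.mod_eq_emod_of_pos (by norm_num)]; omega
    rw [emitL.eq_def, dif_pos (by norm_num : (0:Int) < 26), hX, h26, emitL_one, emitL_one, hmod]
    simp
  | succ j ih =>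
    have hp1 : (0:Int) < 26 ^ (j + 1 + 1) := by positivity
    have hp2 : (0:Int) < 26 ^ (j + 1) := by positivity
    have hdig : PySem.Int.floordiv (26 * o + r) ((26:Int) ^ (j + 1 + 1))
        = PySem.Int.floordiv o ((26:Int) ^ (j + 1)) := by
      rw [PySem.Int.floordiv_eq_ediv_of_pos hp1, PySem.Int.floordiv_eq_ediv_of_pos hp2]
      have hx : (26 * o + r) / 26 = o := by omega
      rw [show ((26:Int) ^ (j + 1 + 1)) = 26 * 26 ^ (j + 1) from by ring,
          ← Int.ediv_ediv_of_nonneg (by norm_num : (0:Int) ≤ 26), hx]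
    have hstep1 : PySem.Int.floordiv ((26:Int) ^ (j + 1 + 1)) 26 = (26:Int) ^ (j + 1) := by
      rw [PySem.Int.floordiv_eq_ediv_of_pos (by norm_num),
          show ((26:Int) ^ (j + 1 + 1)) = 26 ^ (j + 1) * 26 from by ring]
      exact Int.mul_ediv_cancel _ (by norm_num)
    have hstep2 : PySem.Int.floordiv ((26:Int) ^ (j + 1)) 26 = (26:Int) ^ j := by
      rw [PySem.Int.floordiv_eq_ediv_of_pos (by norm_num),
          show ((26:Int) ^ (j + 1)) = 26 ^ j * 26 from by ring]
      exact Int.mul_ediv_cancel _ (by norm_num)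
    conv_lhs => rw [emitL.eq_def]
    rw [dif_pos hp1, hdig, hstep1, ih]
    conv_rhs => rw [emitL.eq_def]
    rw [dif_pos hp2, hstep2, List.cons_append]

-- B's colLabel on single-letter columns
theorem colLabelB_base (col : Int) (h0 : 0 ≤ col) (h26 : col < 26) :
    colLabelB col = [Char.ofNat ((PySem.Int.mod col 26).toNat + 65)] := by
  rw [colLabelB, if_neg (by omega)]
  have hfw : findW col 0 26 = (0, 26) := by
    rw [findW.eq_def, dif_neg (fun h => by omega)]
  rw [hfw]
  have h1 : PySem.Int.floordiv 26 26 = 1 := by decide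
  simp only [h1, Int.sub_zero]
  exact emitL_one col

-- B's colLabel satisfies A's recurrence on multi-letter columns
theorem colLabelB_step (col : Int) (h : 26 ≤ col) :
    colLabelB col = colLabelB (PySem.Int.floordiv col 26 - 1)
      ++ [Char.ofNat ((PySem.Int.mod col 26).toNat + 65)] := by
  have hq := PySem.Int.floordiv_mul_add_mod col 26
  have hr0 : 0 ≤ PySem.Int.mod col 26 := PySem.Int.mod_nonneg col (by norm_num)
  have hr26 : PySem.Int.mod col 26 < 26 := PySem.Int.mod_lt col (by norm_num)
  have hfd1 : 1 ≤ PySem.Int.floordiv col 26 := by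
    rw [PySem.Int.le_floordiv_iff_mul_le (by norm_num)]; omega
  set col' := PySem.Int.floordiv col 26 - 1 with hcol'
  have hcol'0 : 0 ≤ col' := by omega
  -- the two stage-1 scans are shift-related
  have hstart : findW col' (-1) 1 = findW col' 0 26 := by
    rw [findW.eq_def (start := -1), dif_pos ⟨one_pos, by omega⟩]; norm_num
  have hshift : findW col 0 26 = (26 * (findW col' 0 26).1 + 26, 26 * (findW col' 0 26).2) := by
    have := findW_shift col (-1) 1 one_pos
    rw [hstart] at this
    simpa using this
  obtain ⟨j, hW⟩ := findW_pow col' 0 26 ⟨0, by norm_num⟩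
  set S := (findW col' 0 26).1 with hS
  set W := (findW col' 0 26).2 with hWdef
  have hWpos : (0:Int) < W := by rw [hW]; positivity
  have hp : PySem.Int.floordiv (26 * W) 26 = W := by
    rw [PySem.Int.floordiv_eq_iff_of_pos (by norm_num)]; omega
  have hpW : PySem.Int.floordiv W 26 = (26:Int) ^ j := by
    rw [PySem.Int.floordiv_eq_ediv_of_pos (by norm_num), hW,
        show ((26:Int) ^ (j + 1)) = 26 ^ j * 26 from by ring]
    exact Int.mul_ediv_cancel _ (by norm_num)
  have hoff : col - (26 * S + 26) = 26 * (col' - S) + PySem.Int.mod col 26 := by omega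
  rw [colLabelB, if_neg (by omega), colLabelB, if_neg (by omega)]
  simp only [hshift, ← hS, ← hWdef, hp, hpW, hoff]
  rw [hW, emit_shift j (col' - S) (PySem.Int.mod col 26) hr0 hr26]

-- loop ↔ two-stage: A's accumulator loop equals B's label followed by the pending suffix
theorem colLabelA_eq (col : Int) (acc : List Char) :
    colLabelA col acc = colLabelB col ++ acc := by
  by_cases h : 0 ≤ col
  · rw [colLabelA.eq_def, dif_pos h]
    by_cases h26 : 26 ≤ col
    · have hfd1 : 1 ≤ PySem.Int.floordiv col 26 := by
        rw [PySem.Int.le_floordiv_iff_mul_le (by norm_num)]; omega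
      rw [colLabelA_eq (PySem.Int.floordiv col 26 - 1) _, colLabelB_step col h26]
      simp
    · have h1 : PySem.Int.floordiv col 26 = 0 := by
        rw [PySem.Int.floordiv_eq_iff_of_pos (by norm_num)]; omega
      rw [h1, colLabelA.eq_def, dif_neg (by norm_num), colLabelB_base col h (by omega)]
      simp
  · rw [colLabelA.eq_def, dif_neg h, colLabelB, if_pos (by omega)]
    simp
termination_by (col + 1).toNat
decreasing_by
  have he : PySem.Int.floordiv col 26 = col / 26 := PySem.Int.floordiv_eq_ediv_of_pos (by norm_num)
  have h1 := Int.ediv_le_self 26 h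
  omega

-- ===== VERDICT (by name: the statement is the Claim_ definition above) =====
theorem moveToString_spec : Claim_equal_moveToString := by
  intro from_row from_col to_row to_col n _
  show _ = _
  simp [moveToString, moveToString_alt, colLabelA_eq]
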